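-- pv_equiv track=rewrite | github.com/xkhanhnguyen/codesignal-arcade | Intro/Smooth Sailing/12_SortByHeight.py | solution
-- ===== SOURCE A (Python) =====
-- def solution(a):
--     b = sorted([i for i in a if i!=-1]) # a temp array of sorted height
--     p = 0
--     for t in range(len(a)):
--         if a[t] == -1:
--             pass
--         else:
--             a[t] = b[p] # append the height
--             p+=1
--     return a
-- ===== SOURCE B (Python) =====
-- def solution(a):
--     # Online binary-insertion sort of the heights (hand-rolled binary search +
--     # list.insert), then a fresh output list is rebuilt around the trees.
--     # Does not mutate the argument (A does); the return value is the same.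
--     s = []
--     for x in a:
--         if x != -1:
--             lo = 0
--             hi = len(s)
--             while lo < hi:
--                 mid = (lo + hi) // 2
--                 if s[mid] <= x:
--                     lo = mid + 1
--                 else:
--                     hi = mid
--             s.insert(lo, x)
--     out = []
--     k = 0
--     for x in a:
--         if x == -1:
--             out.append(-1)
--         else:
--             out.append(s[k])
--             k += 1
--     return out
-- ===== Notes on version B (the rewrite author's own statement) =====
-- stated objective: alternative
-- what changed: B replaces A's library sort plus in-place counter write-back over the input list with an online binary-insertion sort (hand-rolled binary search + list.insert into a growing sorted accumulator) followed by rebuilding a fresh output list around the -1 slots; B does not mutate the argument (the equivalence is about the return value).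
import Mathlib
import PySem

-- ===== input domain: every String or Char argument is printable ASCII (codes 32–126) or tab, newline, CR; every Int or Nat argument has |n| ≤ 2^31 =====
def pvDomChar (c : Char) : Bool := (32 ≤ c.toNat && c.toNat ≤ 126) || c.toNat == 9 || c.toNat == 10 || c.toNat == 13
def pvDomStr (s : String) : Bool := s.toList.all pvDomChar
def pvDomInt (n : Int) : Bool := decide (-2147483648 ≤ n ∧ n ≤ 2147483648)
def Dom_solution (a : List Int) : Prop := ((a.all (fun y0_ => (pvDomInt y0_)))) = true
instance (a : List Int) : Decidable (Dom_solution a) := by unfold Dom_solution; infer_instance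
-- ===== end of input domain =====

-- B replaces A's library sort + in-place counter write-back with an online binary-insertion sort and
-- a fresh rebuilt output list (alternative algorithm). Python A mutates its argument in place and
-- returns it; B does not mutate — the equivalence proved here is about the RETURN value only.

-- ===== PORT A =====
-- b[p] is always in range in A (p never exceeds the number of non-(-1) elements), so its read is
-- ported with pyGetD; the port is otherwise step-for-step A's indexed loop with the counter p.
def solution (a : List Int) : List Int :=
  let b := PySem.List.sorted (a.filter (fun i => i != -1)) (fun x => x) false
  let st := (PySem.List.pyRange 0 (a.length : Int) 1).foldl
    (fun (st : List Int × Int) t =>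
      if PySem.List.pyGetD st.1 t 0 == -1 then st
      else (PySem.List.pySetD st.1 t (PySem.List.pyGetD b st.2 0), st.2 + 1))
    (a, 0)
  st.1

-- ===== PORT B =====
-- Source B's 'while lo < hi' binary-search loop, step for step (s[mid] is in range whenever
-- 0 ≤ lo < hi ≤ len(s), so the read is ported with pyGetD); terminates because hi - lo shrinks.
def pvBisect (s : List Int) (x lo hi : Int) : Int :=
  if lo < hi then
    let mid := PySem.Int.floordiv (lo + hi) 2
    if PySem.List.pyGetD s mid 0 ≤ x then pvBisect s x (mid + 1) hi
    else pvBisect s x lo mid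
  else lo
termination_by (hi - lo).toNat
decreasing_by
  · have h := PySem.Int.floordiv_two_mid_bounds (le_of_lt (by assumption : lo < hi))
    have h2 := (PySem.Int.floordiv_lt_iff_lt_mul (a := lo + hi) (q := hi)
      (by norm_num : (0:Int) < 2)).2 (by omega)
    omega
  · have h := PySem.Int.floordiv_two_mid_bounds (le_of_lt (by assumption : lo < hi))
    have h2 := (PySem.Int.floordiv_lt_iff_lt_mul (a := lo + hi) (q := hi)
      (by norm_num : (0:Int) < 2)).2 (by omega)
    omega

-- s[k] is always in range in B's rebuild loop (k never exceeds the number of non-(-1) elements): pyGetD.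
def solution_alt (a : List Int) : List Int :=
  let s := a.foldl
    (fun s x =>
      if x != -1 then PySem.List.insert s (pvBisect s x 0 (s.length : Int)) x else s)
    []
  let st := a.foldl
    (fun (st : List Int × Int) x =>
      if x == -1 then (st.1 ++ [(-1 : Int)], st.2)
      else (st.1 ++ [PySem.List.pyGetD s st.2 0], st.2 + 1))
    ([], 0)
  st.1

-- ===== PRECONDITION & SPEC =====
def Spec_solution (a : List Int) (out : List Int) : Prop := out = solution_alt a
instance (a : List Int) (out : List Int) : Decidable (Spec_solution a out) := by unfold Spec_solution; infer_instance

-- ===== CLAIM (what is proved, stated in full; the proofs are below) =====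
def Claim_equal_solution : Prop := ∀ (a : List Int), Dom_solution a → Spec_solution a (solution a)

-- ===== LEMMAS AND PROOFS =====

-- Canonical form both ports are reduced to: overwrite the non-(-1) slots of xs with the values vs in order.
def pvFill : List Int → List Int → List Int
  | [], _ => []
  | x :: xs, vs =>
    if x = -1 then -1 :: pvFill xs vs
    else vs.headD 0 :: pvFill xs vs.tail

lemma pv_getD_append_cons (pre xs : List Int) (x d : Int) :
    (pre ++ x :: xs).getD pre.length d = x := by
  induction pre with
  | nil => rfl
  | cons p ps ih => simpa using ih

lemma pv_set_append_cons (pre xs : List Int) (x v : Int) :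
    (pre ++ x :: xs).set pre.length v = pre ++ v :: xs := by
  induction pre with
  | nil => rfl
  | cons p ps ih => simpa using ih

-- A's loop, with processed prefix pre, writes pvFill of the suffix.
lemma pv_loopA (xs : List Int) : ∀ (pre b : List Int) (p : Nat),
    p + (xs.filter (fun x => x != -1)).length ≤ b.length →
    (PySem.List.pyRange (pre.length : Int) ((pre.length : Int) + (xs.length : Int)) 1).foldl
      (fun (st : List Int × Int) t =>
        if PySem.List.pyGetD st.1 t 0 == -1 then st
        else (PySem.List.pySetD st.1 t (PySem.List.pyGetD b st.2 0), st.2 + 1))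
      (pre ++ xs, (p : Int))
    = (pre ++ pvFill xs (b.drop p),
       ((p + (xs.filter (fun x => x != -1)).length : Nat) : Int)) := by
  induction xs with
  | nil =>
    intro pre b p _
    simp [PySem.List.pyRange_one_eq_nil, pvFill]
  | cons x xs ih =>
    intro pre b p hp
    rw [PySem.List.pyRange_one_cons (by simp only [List.length_cons]; push_cast; omega)]
    simp only [List.foldl_cons]
    have hget : PySem.List.pyGetD (pre ++ x :: xs) (pre.length : Int) 0 = x := by
      simpa using pv_getD_append_cons pre xs x 0
    by_cases hx : x = -1
    · subst hx
      rw [hget]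
      simp only [BEq.rfl, if_pos]
      have hp' : p + (xs.filter (fun x => x != -1)).length ≤ b.length := by
        simpa [List.filter] using hp
      have := ih (pre ++ [(-1 : Int)]) b p hp'
      simp only [List.length_append, List.length_cons, List.length_nil] at this ⊢
      rw [pvFill, if_pos rfl]
      simp only [List.filter_cons]
      norm_num
      convert this using 2
      all_goals first
        | (push_cast; simp; done)
        | (congr 1 <;> push_cast <;> ring_nf; done)
        | (push_cast; omega)
    · have hstep : ((x : Int) == -1) = false := by simp [hx]
      rw [hget, hstep]
      simp only [Bool.false_eq_true, if_false]
      have hflen : p + 1 + (xs.filter (fun x => x != -1)).length ≤ b.length := by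
        have : ((x :: xs).filter (fun x => x != -1)).length
            = (xs.filter (fun x => x != -1)).length + 1 := by
          simp [List.filter_cons, hx]
        omega
      have hpb : p < b.length := by omega
      have hset : PySem.List.pySetD (pre ++ x :: xs) (pre.length : Int)
          (PySem.List.pyGetD b (p : Int) 0) = pre ++ (PySem.List.pyGetD b (p : Int) 0) :: xs := by
        rw [PySem.List.pySetD_natCast]
        exact pv_set_append_cons pre xs x _
      rw [hset]
      set v := PySem.List.pyGetD b (p : Int) 0 with hv
      have hrec := ih (pre ++ [v]) b (p + 1) hflen
      have hhead : (b.drop p).headD 0 = v := by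
        rw [hv, PySem.List.pyGetD_natCast]
        simp [List.head?_drop, List.getD_eq_getElem?_getD]
      have hdrop : b.drop (p + 1) = (b.drop p).tail := by
        rw [List.tail_drop]
      rw [pvFill, if_neg hx, hhead, ← hdrop]
      simp only [List.filter_cons, hx]
      simp only [List.length_append, List.length_cons, List.length_nil] at hrec ⊢
      norm_num
      convert hrec using 2
      all_goals first
        | (push_cast; simp; done)
        | (congr 1 <;> push_cast <;> ring_nf; done)
        | (rw [if_neg hx]; push_cast [List.length_cons]; omega)
        | (push_cast; omega)

-- The binary-search loop: on a sorted s, with the invariant that everything left of lo is ≤ x and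
-- everything from hi on is > x, it returns the insertion point (rightmost position).
lemma pv_bisect_spec (s : List Int) (x : Int) (hs : s.Pairwise (· ≤ ·)) :
    ∀ (n : Nat) (lo hi : Int), (hi - lo).toNat ≤ n → 0 ≤ lo → lo ≤ hi → hi ≤ (s.length : Int) →
    (∀ (j : Nat) (hj : j < s.length), (j : Int) < lo → s[j] ≤ x) →
    (∀ (j : Nat) (hj : j < s.length), hi ≤ (j : Int) → x < s[j]) →
    0 ≤ pvBisect s x lo hi ∧ pvBisect s x lo hi ≤ (s.length : Int) ∧
    (∀ (j : Nat) (hj : j < s.length), (j : Int) < pvBisect s x lo hi → s[j] ≤ x) ∧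
    (∀ (j : Nat) (hj : j < s.length), pvBisect s x lo hi ≤ (j : Int) → x < s[j]) := by
  intro n
  induction n with
  | zero =>
    intro lo hi hfuel h0 hlohi hhi hlow hhigh
    have heq : lo = hi := by omega
    rw [pvBisect, if_neg (by omega)]
    exact ⟨h0, by omega, hlow, fun j hj hge => hhigh j hj (by omega)⟩
  | succ n ih =>
    intro lo hi hfuel h0 hlohi hhi hlow hhigh
    by_cases hlt : lo < hi
    · rw [pvBisect, if_pos hlt]
      have hmid := PySem.Int.floordiv_two_mid_bounds (le_of_lt hlt)
      have hmidlt : PySem.Int.floordiv (lo + hi) 2 < hi :=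
        (PySem.Int.floordiv_lt_iff_lt_mul (by norm_num : (0:Int) < 2)).2 (by omega)
      set mid := PySem.Int.floordiv (lo + hi) 2 with hm
      have hmidnat : mid = ((mid.toNat : Nat) : Int) := by omega
      have hmlen : mid.toNat < s.length := by omega
      have hget : PySem.List.pyGetD s mid 0 = s[mid.toNat] := by
        conv_lhs => rw [hmidnat]
        rw [PySem.List.pyGetD_natCast]
        simp [List.getD_eq_getElem?_getD, List.getElem?_eq_getElem hmlen]
      simp only [hget]
      by_cases hcmp : s[mid.toNat] ≤ x
      · rw [if_pos hcmp]
        refine ih (mid + 1) hi (by omega) (by omega) (by omega) hhi ?_ hhigh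
        intro j hj hjlt
        rcases lt_or_ge (j : Int) lo with h | h
        · exact hlow j hj h
        · rcases Nat.lt_or_ge j mid.toNat with h2 | h2
          · exact le_trans (List.pairwise_iff_getElem.1 hs j mid.toNat hj hmlen h2) hcmp
          · have : j = mid.toNat := by omega
            subst this; exact hcmp
      · rw [if_neg hcmp]
        refine ih lo mid (by omega) h0 (by omega) (by omega) hlow ?_
        intro j hj hge
        rcases Nat.lt_or_ge mid.toNat j with h2 | h2
        · exact lt_of_lt_of_le (lt_of_not_ge hcmp)
            (List.pairwise_iff_getElem.1 hs mid.toNat j hmlen hj h2)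
        · have : j = mid.toNat := by omega
          subst this; exact lt_of_not_ge hcmp
    · rw [pvBisect, if_neg hlt]
      exact ⟨h0, by omega, hlow, fun j hj hge => hhigh j hj (by omega)⟩

-- One binary-insertion step keeps the accumulator sorted and adds exactly x to its multiset.
lemma pv_bin_insert_step (s : List Int) (x : Int) (hs : s.Pairwise (· ≤ ·)) :
    (PySem.List.insert s (pvBisect s x 0 (s.length : Int)) x).Pairwise (· ≤ ·) ∧
    (PySem.List.insert s (pvBisect s x 0 (s.length : Int)) x).Perm (x :: s) := by
  have hspec := pv_bisect_spec s x hs (s.length : Int).toNat 0 (s.length : Int)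
    (by omega) (by omega) (by omega) (by omega)
    (by intro j hj h; omega) (by intro j hj h; omega)
  obtain ⟨h0, hle, hlow, hhigh⟩ := hspec
  set r := pvBisect s x 0 (s.length : Int) with hr
  have hrnat : r = ((r.toNat : Nat) : Int) := by omega
  have hrlen : r.toNat ≤ s.length := by omega
  have hins : PySem.List.insert s r x = s.take r.toNat ++ x :: s.drop r.toNat := by
    rw [hrnat]; exact PySem.List.insert_natCast s r.toNat x hrlen
  rw [hins]
  constructor
  · rw [List.pairwise_append]
    refine ⟨List.Pairwise.sublist (List.take_sublist _ _) hs, ?_, ?_⟩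
    · rw [List.pairwise_cons]
      refine ⟨?_, List.Pairwise.sublist (List.drop_sublist _ _) hs⟩
      intro b hb
      rcases List.mem_iff_getElem.1 hb with ⟨k, hk, rfl⟩
      rw [List.getElem_drop]
      exact le_of_lt (hhigh (r.toNat + k) (by rw [List.length_drop] at hk; omega) (by omega))
    · intro a ha b hb
      rcases List.mem_take_iff_getElem.1 ha with ⟨j, hj, rfl⟩
      have hax : s[j] ≤ x := hlow j (by omega) (by omega)
      rcases List.mem_cons.1 hb with rfl | hb
      · exact hax
      · rcases List.mem_iff_getElem.1 hb with ⟨k, hk, rfl⟩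
        rw [List.getElem_drop]
        exact le_of_lt (lt_of_le_of_lt hax
          (hhigh (r.toNat + k) (by rw [List.length_drop] at hk; omega) (by omega)))
  · exact List.perm_middle.trans (by rw [List.take_append_drop])

-- B's insertion fold: the accumulator stays sorted and accumulates the multiset of the list.
lemma pv_fold_bin_insert (l : List Int) : ∀ (acc : List Int), acc.Pairwise (· ≤ ·) →
    (l.foldl (fun s x => PySem.List.insert s (pvBisect s x 0 (s.length : Int)) x) acc).Pairwise
      (· ≤ ·) ∧
    (l.foldl (fun s x => PySem.List.insert s (pvBisect s x 0 (s.length : Int)) x) acc).Perm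
      (acc ++ l) := by
  induction l with
  | nil => intro acc h; exact ⟨by simpa using h, by simp⟩
  | cons x xs ih =>
    intro acc h
    simp only [List.foldl_cons]
    obtain ⟨hsorted, hperm⟩ := pv_bin_insert_step acc x h
    obtain ⟨hs2, hp2⟩ := ih _ hsorted
    refine ⟨hs2, hp2.trans ?_⟩
    refine (hperm.append_right xs).trans ?_
    exact List.perm_middle.symm.trans (by simp)

-- folding with the != -1 guard is folding the insertion step over the filtered list
lemma pv_fold_filter (l : List Int) : ∀ (acc : List Int),
    l.foldl
      (fun s x =>
        if x != -1 then PySem.List.insert s (pvBisect s x 0 (s.length : Int)) x else s) acc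
      = (l.filter (fun x => x != -1)).foldl
          (fun s x => PySem.List.insert s (pvBisect s x 0 (s.length : Int)) x) acc := by
  induction l with
  | nil => intro acc; rfl
  | cons x xs ih =>
    intro acc
    by_cases hx : x = -1
    · subst hx; simpa using ih acc
    · simp only [List.foldl_cons, List.filter_cons, show ((x : Int) != -1) = true by simp [hx],
        if_pos, List.foldl_cons]
      exact ih _

-- B's binary-insertion fold equals Python's sorted on the filtered list.
lemma pv_fold_eq_sorted (a : List Int) :
    a.foldl
      (fun s x =>
        if x != -1 then PySem.List.insert s (pvBisect s x 0 (s.length : Int)) x else s) []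
      = PySem.List.sorted (a.filter (fun x => x != -1)) (fun x => x) false := by
  rw [pv_fold_filter]
  obtain ⟨hpw, hperm⟩ := pv_fold_bin_insert (a.filter (fun x => x != -1)) [] (by simp)
  exact (PySem.List.sorted_id_eq_of_perm_of_pairwise _ _ (by simpa using hperm) hpw).symm

-- B's rebuild loop, consuming s from position p, appends pvFill of the suffix.
lemma pv_loopB (xs : List Int) : ∀ (out s : List Int) (p : Nat),
    p + (xs.filter (fun x => x != -1)).length ≤ s.length →
    xs.foldl
      (fun (st : List Int × Int) x =>
        if x == -1 then (st.1 ++ [(-1 : Int)], st.2)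
        else (st.1 ++ [PySem.List.pyGetD s st.2 0], st.2 + 1))
      (out, (p : Int))
    = (out ++ pvFill xs (s.drop p),
       ((p + (xs.filter (fun x => x != -1)).length : Nat) : Int)) := by
  induction xs with
  | nil => intro out s p _; simp [pvFill]
  | cons x xs ih =>
    intro out s p hp
    simp only [List.foldl_cons]
    by_cases hx : x = -1
    · subst hx
      simp only [BEq.rfl, if_pos]
      have hp' : p + (xs.filter (fun x => x != -1)).length ≤ s.length := by
        simpa [List.filter] using hp
      rw [ih (out ++ [(-1 : Int)]) s p hp']
      rw [pvFill, if_pos rfl]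
      simp [List.filter_cons]
    · have hstep : ((x : Int) == -1) = false := by simp [hx]
      rw [hstep]
      simp only [Bool.false_eq_true, if_false]
      have hflen : p + 1 + (xs.filter (fun x => x != -1)).length ≤ s.length := by
        have : ((x :: xs).filter (fun x => x != -1)).length
            = (xs.filter (fun x => x != -1)).length + 1 := by
          simp [List.filter_cons, hx]
        omega
      have hpb : p < s.length := by omega
      set v := PySem.List.pyGetD s (p : Int) 0 with hv
      have hhead : (s.drop p).headD 0 = v := by
        rw [hv, PySem.List.pyGetD_natCast]
        simp [List.head?_drop, List.getD_eq_getElem?_getD]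
      have hdrop : s.drop (p + 1) = (s.drop p).tail := by
        rw [List.tail_drop]
      have hrec := ih (out ++ [v]) s (p + 1) hflen
      rw [pvFill, if_neg hx, hhead, ← hdrop]
      simp only [List.filter_cons, show ((x : Int) != -1) = true by simp [hx], if_pos,
        List.length_cons]
      have hc : ((p : Int) + 1) = (((p + 1 : Nat) : Nat) : Int) := by push_cast; ring
      rw [hc, hrec, Prod.mk.injEq]
      constructor
      · simp
      · push_cast; ring

-- ===== VERDICT (by name: the statement is the Claim_ definition above) =====
theorem solution_spec : Claim_equal_solution := by
  intro a _
  simp only [Spec_solution, solution, solution_alt]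
  set b := PySem.List.sorted (a.filter (fun i => i != -1)) (fun x => x) false with hb
  have hblen : b.length = (a.filter (fun i => i != -1)).length := by
    rw [hb]; exact (PySem.List.sorted_perm _ _ _).length_eq
  have hA := pv_loopA a [] b 0 (by omega)
  simp only [List.nil_append, List.length_nil, Nat.cast_zero,
    List.drop_zero, zero_add] at hA
  have hs := pv_fold_eq_sorted a
  have hB := pv_loopB a [] b 0 (by omega)
  simp only [List.nil_append, List.drop_zero, zero_add, Nat.cast_zero] at hB
  rw [hA, hs, ← hb, hB]
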